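-- pv_equiv track=rewrite | github.com/amiller27/SMITE | test/parse_log.py | parse_metis
-- ===== SOURCE A (Python) =====
-- from enum import Enum, auto
--
-- def fix(line):
--     return line.replace(", )", ")").replace(", ]", "]").replace(", }", "}")
--
-- def splitlines(line):
--     delims = "]})"
--
--     out_line = ""
--     for c in line:
--         out_line += c
--         if c in delims:
--             out_line += "\n"
--
--     return out_line
--
-- def parse_metis(log):
--     class State(Enum):
--         PRE_METIS = auto()
--         METIS = auto()
--
--     metis_log = [""]
--     extras = [""]
--
--     state = State.PRE_METIS
--
--     for line in log.splitlines():
--         target = extras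
--
--         if state == State.PRE_METIS:
--             if line.startswith("     Running `"):
--                 state = State.METIS
--         elif state == State.METIS:
--             target = metis_log
--         else:
--             assert False
--
--         target[0] += splitlines(fix(line)) + "\n"
--
--     return min(metis_log), min(extras)
-- ===== SOURCE B (Python) =====
-- def fix(line):
--     return line.replace(", )", ")").replace(", ]", "]").replace(", }", "}")
--
--
-- def splitlines(line):
--     return "".join(c + "\n" if c in "]})" else c for c in line)
--
--
-- def parse_metis(log):
--     lines = log.splitlines()
--     split = len(lines)
--     for i, line in enumerate(lines):
--         if line.startswith("     Running `"):
--             split = i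
--             break
--     parts = [splitlines(fix(line)) + "\n" for line in lines]
--     return "".join(parts[split + 1:]), "".join(parts[:split + 1])
-- ===== Notes on version B (the rewrite author's own statement) =====
-- stated objective: simpler
-- what changed: Replaces A's mutating two-state (Enum) machine over singleton-list accumulators with a find-the-split-index scan followed by a per-line transform map and two slice joins.
import Mathlib
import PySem

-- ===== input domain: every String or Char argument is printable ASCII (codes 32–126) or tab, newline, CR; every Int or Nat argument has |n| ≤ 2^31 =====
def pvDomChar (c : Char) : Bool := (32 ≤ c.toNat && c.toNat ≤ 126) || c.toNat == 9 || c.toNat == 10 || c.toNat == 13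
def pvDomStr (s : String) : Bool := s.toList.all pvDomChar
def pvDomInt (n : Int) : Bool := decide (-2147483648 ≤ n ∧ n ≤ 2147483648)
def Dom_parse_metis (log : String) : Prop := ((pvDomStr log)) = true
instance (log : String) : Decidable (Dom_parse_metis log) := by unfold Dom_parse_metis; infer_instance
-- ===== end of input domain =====

-- B replaces A's mutating two-state machine with a find-the-split-index, map-then-partition-and-join decomposition (objective: simpler; same O(n) cost).

-- ===== PORT A =====
-- helper fix(line): three chained str.replace calls
def pyFix (line : String) : String :=
  PySem.Str.replace (PySem.Str.replace (PySem.Str.replace line ", )" ")") ", ]" "]") ", }" "}"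

-- helper splitlines(line): char-by-char loop appending '\n' after each of "]})"
def pySplitlines (line : String) : String :=
  String.ofList (line.toList.foldl
    (fun out c => (out ++ [c]) ++ (if c ∈ ("]})".toList) then ['\n'] else [])) [])

-- the for-loop over log.splitlines(); state = true means State.METIS; metis/extras are
-- the [0] cells of A's singleton lists (min of a one-element list is its element)
def parseLoopA : List String → Bool → String → String → String × String
  | [], _, metis, extras => (metis, extras)
  | line :: rest, state, metis, extras =>
    if state then
      parseLoopA rest state (metis ++ (pySplitlines (pyFix line) ++ "\n")) extras
    else
      parseLoopA rest (PySem.Str.startswith line "     Running `") metis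
        (extras ++ (pySplitlines (pyFix line) ++ "\n"))

def parse_metis (log : String) : String × String :=
  parseLoopA (PySem.Str.splitlines log) false "" ""

-- ===== PORT B =====
-- helper splitlines(line) in B: a join over a per-char comprehension
def pySplitlinesB (line : String) : String :=
  PySem.Str.join "" (line.toList.map (fun c => if c ∈ ("]})".toList) then String.ofList [c, '\n'] else String.ofList [c]))

def parse_metis_alt (log : String) : String × String :=
  let lines := PySem.Str.splitlines log
  let split := lines.findIdx (fun line => PySem.Str.startswith line "     Running `")
  let parts := lines.map (fun line => pySplitlinesB (pyFix line) ++ "\n")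
  (PySem.Str.join "" (parts.drop (split + 1)), PySem.Str.join "" (parts.take (split + 1)))

-- ===== PRECONDITION & SPEC =====
def Spec_parse_metis (log : String) (out : String × String) : Prop := out = parse_metis_alt log
instance (log : String) (out : String × String) : Decidable (Spec_parse_metis log out) := by unfold Spec_parse_metis; infer_instance

-- ===== CLAIM (what is proved, stated in full; the proofs are below) =====
def Claim_equal_parse_metis : Prop := ∀ (log : String), Dom_parse_metis log → Spec_parse_metis log (parse_metis log)

-- ===== LEMMAS AND PROOFS =====

theorem join_empty_nil : PySem.Str.join "" [] = "" := by decide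

theorem join_empty_cons (x : String) (xs : List String) :
    PySem.Str.join "" (x :: xs) = x ++ PySem.Str.join "" xs := by
  cases xs with
  | nil => simp [PySem.Str.join, PySem.Chars.join, List.intercalate]
  | cons y r =>
      simp [PySem.Str.join, PySem.Chars.join_cons_cons, String.ofList_append,
        String.ofList_toList]

-- A's accumulator fold written as a flatMap
theorem foldA_eq (cs acc : List Char) :
    cs.foldl (fun out c => (out ++ [c]) ++ (if c ∈ ("]})".toList) then ['\n'] else [])) acc
      = acc ++ cs.flatMap (fun c => c :: (if c ∈ ("]})".toList) then ['\n'] else [])) := by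
  induction cs generalizing acc with
  | nil => simp
  | cons c cs ih => simp [List.flatMap_def]

-- B's join over per-char pieces written as the same flatMap
theorem joinB_eq (cs : List Char) :
    PySem.Str.join "" (cs.map
        (fun c => if c ∈ ("]})".toList) then String.ofList [c, '\n'] else String.ofList [c]))
      = String.ofList (cs.flatMap (fun c => c :: (if c ∈ ("]})".toList) then ['\n'] else []))) := by
  induction cs with
  | nil => simp [join_empty_nil]
  | cons c cs ih =>
      simp only [List.map_cons, List.flatMap_cons, join_empty_cons]
      rw [ih]
      by_cases h : c = ']' ∨ c = '}' ∨ c = ')' <;> simp [h, ← String.ofList_append]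

-- B's per-char splitlines equals A's fold
theorem splitlinesB_eq (line : String) : pySplitlinesB line = pySplitlines line := by
  unfold pySplitlinesB pySplitlines
  rw [joinB_eq, foldA_eq]
  simp

-- once in METIS state, everything appends to metis
theorem parseLoopA_true (ls : List String) (m e : String) :
    parseLoopA ls true m e =
      (m ++ PySem.Str.join "" (ls.map (fun line => pySplitlines (pyFix line) ++ "\n")), e) := by
  induction ls generalizing m with
  | nil => simp [parseLoopA, join_empty_nil]
  | cons l ls ih =>
      simp [parseLoopA, ih, join_empty_cons, String.append_assoc]

-- in PRE_METIS state, the result partitions at the first "     Running `" line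
theorem parseLoopA_false (ls : List String) (m e : String) :
    parseLoopA ls false m e =
      (m ++ PySem.Str.join "" ((ls.map (fun line => pySplitlines (pyFix line) ++ "\n")).drop
          (ls.findIdx (fun line => PySem.Str.startswith line "     Running `") + 1)),
       e ++ PySem.Str.join "" ((ls.map (fun line => pySplitlines (pyFix line) ++ "\n")).take
          (ls.findIdx (fun line => PySem.Str.startswith line "     Running `") + 1))) := by
  induction ls generalizing m e with
  | nil => simp [parseLoopA, join_empty_nil]
  | cons l ls ih =>
      cases h : PySem.Str.startswith l "     Running `" with
      | true =>
          simp at h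
          simp [parseLoopA, h, parseLoopA_true, List.findIdx_cons, join_empty_cons,
            join_empty_nil, String.append_empty]
      | false =>
          simp at h
          simp [parseLoopA, h, ih, List.findIdx_cons, join_empty_cons, String.append_assoc]

-- ===== VERDICT (by name: the statement is the Claim_ definition above) =====
theorem parse_metis_spec : Claim_equal_parse_metis := by
  intro log _
  unfold Spec_parse_metis parse_metis parse_metis_alt
  simp only [parseLoopA_false, splitlinesB_eq, String.empty_append]
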